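-- pv_equiv track=rewrite | github.com/qtong0/LeetcodePythonProject | solutions/leetcode_1901_1950/LeetCode1937_MaximumNumberOfPointsWithCost.py | maxPoints_own_TLE
-- ===== SOURCE A (Python) =====
-- def maxPoints_own_TLE(points: list[list[int]]) -> int:
--     if not points or not points[0]:
--         return 0
--     m, n = len(points), len(points[0])
--     dp = list(points[0])
--     for i in range(1, m):
--         new_dp = [float('-inf')]*n
--         for j in range(n):
--             for k in range(n):
--                 diff = j-k if j>k else k-j
--                 new_dp[j] = max(new_dp[j], dp[k] + points[i][j] - diff)
--         dp = new_dp
--     return max(dp)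
-- ===== SOURCE B (Python) =====
-- def maxPoints_own_TLE(points: list[list[int]]) -> int:
--     if not points or not points[0]:
--         return 0
--     dp = points[0][:]
--     for row in points[1:]:
--         left = []
--         best = dp[0]
--         for v in dp:
--             best = max(best - 1, v)
--             left.append(best)
--         right = []
--         best = dp[-1]
--         for v in reversed(dp):
--             best = max(best - 1, v)
--             right.append(best)
--         right.reverse()
--         dp = [p + max(l, r) for p, l, r in zip(row, left, right)]
--     return max(dp)
-- ===== Notes on version B (the rewrite author's own statement) =====
-- stated objective: faster
-- what changed: Replaces the per-row O(n^2) scan over all source columns with two linear running-max passes (left-to-right and right-to-left), splitting dp[k]-|j-k| into prefix and suffix maxima.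
import Mathlib
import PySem

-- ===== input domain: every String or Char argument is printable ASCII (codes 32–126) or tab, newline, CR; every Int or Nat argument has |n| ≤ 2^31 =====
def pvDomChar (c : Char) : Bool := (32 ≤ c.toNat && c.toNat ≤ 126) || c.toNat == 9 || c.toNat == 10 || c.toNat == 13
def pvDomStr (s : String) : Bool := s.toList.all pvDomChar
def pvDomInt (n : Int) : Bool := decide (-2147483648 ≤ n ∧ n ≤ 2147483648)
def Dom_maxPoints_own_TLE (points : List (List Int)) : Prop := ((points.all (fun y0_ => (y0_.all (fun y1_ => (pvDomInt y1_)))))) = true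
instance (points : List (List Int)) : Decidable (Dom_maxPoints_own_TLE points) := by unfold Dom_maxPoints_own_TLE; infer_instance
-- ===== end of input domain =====

-- B replaces A's per-row O(n^2) scan over source columns by two linear running-max passes (left/right), an asymptotically faster exact algorithm.


-- ===== PORT A =====
-- float('-inf') is modelled by `none` of an Option Int running maximum (pvOMax is `max` with -inf = none);
-- the final `.getD 0` defaults are unreachable inside the guard (n ≥ 1), they only make the port total.
def pvOMax (a : Option Int) (b : Int) : Option Int :=
  match a with
  | none => some b
  | some x => some (max x b)

def maxPoints_own_TLE (points : List (List Int)) : Int :=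
  if points = [] ∨ points.headI = [] then 0
  else
    let m : Int := points.length
    let n : Int := points.headI.length
    let dp := (PySem.List.pyRange 1 m 1).foldl (fun dp i =>
      (PySem.List.pyRange 0 n 1).map (fun j =>
        ((PySem.List.pyRange 0 n 1).foldl (fun acc k =>
          pvOMax acc (PySem.List.pyGetD dp k 0
            + PySem.List.pyGetD (PySem.List.pyGetD points i []) j 0
            - (if j > k then j - k else k - j))) none).getD 0)) points.headI
    (PySem.List.max? dp (fun x => x)).getD 0

-- ===== PORT B =====
-- running-max pass: best = max(best - 1, v) for each v, collecting the bests
def pvLeftScan (best : Int) : List Int → List Int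
  | [] => []
  | v :: vs => max (best - 1) v :: pvLeftScan (max (best - 1) v) vs

def maxPoints_own_TLE_alt (points : List (List Int)) : Int :=
  if points = [] ∨ points.headI = [] then 0
  else
    let dp := points.tail.foldl (fun dp row =>
      let left := pvLeftScan dp.headI dp
      let right := (pvLeftScan dp.reverse.headI dp.reverse).reverse
      List.zipWith (fun p l => p + l) row (List.zipWith max left right)) points.headI
    (PySem.List.max? dp (fun x => x)).getD 0

-- ===== PRECONDITION & SPEC =====
-- Pre_ excludes exactly the ragged inputs on which A raises IndexError: a later row
-- shorter than the first row (A indexes points[i][j] for every j < len(points[0])).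
def Pre_maxPoints_own_TLE (points : List (List Int)) : Prop :=
  ∀ row ∈ points, points.headI.length ≤ row.length
instance (points : List (List Int)) : Decidable (Pre_maxPoints_own_TLE points) := by
  unfold Pre_maxPoints_own_TLE; infer_instance

def pvWitness_maxPoints_own_TLE : List (List Int) := [[1, 2, 3], [1, 5, 1], [3, 1, 1]]

def Spec_maxPoints_own_TLE (points : List (List Int)) (out : Int) : Prop := out = maxPoints_own_TLE_alt points
instance (points : List (List Int)) (out : Int) : Decidable (Spec_maxPoints_own_TLE points out) := by unfold Spec_maxPoints_own_TLE; infer_instance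

-- ===== CLAIM (what is proved, stated in full; the proofs are below) =====
def Claim_equal_maxPoints_own_TLE : Prop := ∀ (points : List (List Int)), Dom_maxPoints_own_TLE points → Pre_maxPoints_own_TLE points → Spec_maxPoints_own_TLE points (maxPoints_own_TLE points)

-- ===== LEMMAS AND PROOFS =====

-- the (possibly clipped) distance penalty term of column k seen from column j
def pvF (dp : List Int) (j k : Nat) : Int :=
  dp.getD k 0 - (if (j : Int) > (k : Int) then (j : Int) - (k : Int) else (k : Int) - (j : Int))

-- A's inner maximum over all source columns (k = 0 term doubles as the base; harmless for max)
def pvAMax (dp : List Int) (j : Nat) : Int :=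
  (List.range dp.length).foldl (fun a k => max a (pvF dp j k)) (pvF dp j 0)

lemma pv_scan_length (b : Int) (dp : List Int) : (pvLeftScan b dp).length = dp.length := by
  induction dp generalizing b with
  | nil => rfl
  | cons v vs ih => simp [pvLeftScan, ih]

lemma pv_omax_fold {α : Type} (l : List α) (f : α → Int) (x : Int) :
    l.foldl (fun a k => pvOMax a (f k)) (some x) =
      some (l.foldl (fun a k => max a (f k)) x) := by
  induction l generalizing x with
  | nil => rfl
  | cons h t ih =>
    rw [List.foldl_cons, List.foldl_cons]
    exact ih (max x (f h))

lemma pv_omax_none (b : Int) : pvOMax none b = some b := rfl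

lemma pv_max_add {α : Type} (l : List α) (f : α → Int) (c x : Int) :
    l.foldl (fun a k => max a (c + f k)) (c + x) =
      c + l.foldl (fun a k => max a (f k)) x := by
  induction l generalizing x with
  | nil => rfl
  | cons h t ih =>
    rw [List.foldl_cons, List.foldl_cons, max_add_add_left]
    exact ih (max x (f h))

lemma pv_foldl_max_init {α : Type} (l : List α) (f : α → Int) (a x : Int) :
    l.foldl (fun s k => max s (f k)) (max a x) =
      max a (l.foldl (fun s k => max s (f k)) x) := by
  induction l generalizing x with
  | nil => rfl
  | cons h t ih => simpa [max_assoc] using ih (max x (f h))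

lemma pv_absorb {α : Type} (l : List α) (f : α → Int) (a b : Int) (hab : a ≤ b)
    (x : α) (hx : x ∈ l) (hb : b ≤ f x) :
    l.foldl (fun s k => max s (f k)) a = l.foldl (fun s k => max s (f k)) b := by
  have h1 : l.foldl (fun s k => max s (f k)) (max b a) =
      max b (l.foldl (fun s k => max s (f k)) a) := pv_foldl_max_init l f b a
  have h2 : max b a = b := max_eq_left hab
  have h3 : f x ≤ l.foldl (fun s k => max s (f k)) a :=
    (PySem.List.le_foldl_max_int l f a).2 x hx
  rw [h2] at h1
  rw [h1, max_eq_right (le_trans hb h3)]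

lemma pv_fold_init_swap {α : Type} (l : List α) (f : α → Int) (x y : α)
    (hx : x ∈ l) (hy : y ∈ l) :
    l.foldl (fun s k => max s (f k)) (f x) = l.foldl (fun s k => max s (f k)) (f y) := by
  rcases le_total (f x) (f y) with h | h
  · exact pv_absorb l f (f x) (f y) h y hy le_rfl
  · exact (pv_absorb l f (f y) (f x) h x hx le_rfl).symm

lemma pv_fold_max_perm {α : Type} (l₁ l₂ : List α) (f : α → Int) (a : Int)
    (h : l₁.Perm l₂) :
    l₁.foldl (fun s k => max s (f k)) a = l₂.foldl (fun s k => max s (f k)) a := by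
  have : RightCommutative (fun (s : Int) k => max s (f k)) :=
    ⟨fun b a₁ a₂ => by rw [max_right_comm]⟩
  exact h.foldl_eq a

lemma pv_scan_getElem : ∀ (dp : List Int) (b : Int) (j : Nat) (hj : j < dp.length),
    (pvLeftScan b dp)[j]'(by rw [pv_scan_length]; exact hj) =
      (List.range (j+1)).foldl
        (fun a k => max a (dp.getD k 0 - ((j : Int) - (k : Int)))) (b - 1 - (j : Int)) := by
  intro dp
  induction dp with
  | nil => intro b j hj; simp at hj
  | cons v vs ih =>
    intro b j hj
    cases j with
    | zero =>
      simp [pvLeftScan, List.range_succ, List.getD]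
    | succ j =>
      have hj' : j < vs.length := by simpa using hj
      have lhs : (pvLeftScan b (v :: vs))[j+1]'(by rw [pv_scan_length]; exact hj) =
          (pvLeftScan (max (b-1) v) vs)[j]'(by rw [pv_scan_length]; exact hj') := by
        simp [pvLeftScan]
      rw [lhs, ih (max (b-1) v) j hj']
      conv_rhs => rw [List.range_succ_eq_map, List.foldl_cons, List.foldl_map]
      have hinit : max (b - 1 - ((j : Nat) + 1 : Nat))
            ((v :: vs).getD 0 0 - (((j : Nat) + 1 : Nat) - ((0 : Nat) : Int))) =
          max (b - 1) v - 1 - (j : Int) := by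
        simp [List.getD]; omega
      rw [hinit]
      refine PySem.List.foldl_congr_mem _ _ _ _ ?_
      intro acc k _
      simp only [List.getD_cons_succ]
      congr 1
      push_cast
      ring

lemma pv_headI_eq_getD (l : List Int) (h : l ≠ []) : l.headI = l.getD 0 0 := by
  cases l with
  | nil => exact absurd rfl h
  | cons v vs => rfl

-- B's left entry: the prefix maximum of pvF dp j over k ≤ j
lemma pv_left_entry (dp : List Int) (j : Nat) (hj : j < dp.length) :
    (pvLeftScan dp.headI dp)[j]'(by rw [pv_scan_length]; exact hj) =
      (List.range (j+1)).foldl (fun a k => max a (pvF dp j k)) (pvF dp j 0) := by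
  have hne : dp ≠ [] := by intro h; rw [h] at hj; simp at hj
  have hhead : dp.headI = dp.getD 0 0 := pv_headI_eq_getD dp hne
  rw [pv_scan_getElem dp dp.headI j hj]
  have h1 : (List.range (j+1)).foldl
        (fun a k => max a (dp.getD k 0 - ((j : Int) - (k : Int)))) (dp.headI - 1 - (j : Int)) =
      (List.range (j+1)).foldl (fun a k => max a (pvF dp j k)) (dp.headI - 1 - (j : Int)) := by
    refine PySem.List.foldl_congr_mem _ _ _ _ ?_
    intro acc k hk
    simp only [List.mem_range] at hk
    have hF : pvF dp j k = dp.getD k 0 - ((j : Int) - (k : Int)) := by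
      unfold pvF
      split_ifs with h
      · rfl
      · congr 1; omega
    rw [hF]
  rw [h1]
  have hab : dp.headI - 1 - (j : Int) ≤ pvF dp j 0 := by
    unfold pvF
    rw [hhead]
    generalize dp.getD 0 0 = t
    split_ifs with h <;> omega
  exact pv_absorb _ _ _ _ hab 0 (by simp) le_rfl

-- B's right entry: the suffix maximum of pvF dp j over k ≥ j
lemma pv_right_entry (dp : List Int) (j : Nat) (hj : j < dp.length) :
    ((pvLeftScan dp.reverse.headI dp.reverse).reverse)[j]'
        (by rw [List.length_reverse, pv_scan_length, List.length_reverse]; exact hj) =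
      ((List.range (dp.length - j)).map (fun k => j + k)).foldl
        (fun a k => max a (pvF dp j k)) (pvF dp j j) := by
  have hne : dp.reverse ≠ [] := by
    intro h
    rw [List.reverse_eq_nil_iff] at h
    rw [h] at hj
    simp at hj
  have hlen : (pvLeftScan dp.reverse.headI dp.reverse).length = dp.length := by
    rw [pv_scan_length, List.length_reverse]
  have hidx : dp.length - 1 - j < dp.reverse.length := by
    rw [List.length_reverse]; omega
  have hLHS : ((pvLeftScan dp.reverse.headI dp.reverse).reverse)[j]'
        (by rw [List.length_reverse, hlen]; exact hj) =
      (pvLeftScan dp.reverse.headI dp.reverse)[dp.length - 1 - j]'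
        (by rw [hlen]; omega) := by
    rw [List.getElem_reverse]
    congr 1
    rw [hlen]
  rw [hLHS, pv_scan_getElem dp.reverse dp.reverse.headI (dp.length - 1 - j)
    (by rw [List.length_reverse]; omega)]
  have hm : dp.length - 1 - j + 1 = dp.length - j := by omega
  rw [hm]
  -- rewrite the reversed accesses through pvF at index (n-1-k)
  have h1 : (List.range (dp.length - j)).foldl
        (fun a k => max a (dp.reverse.getD k 0 - (((dp.length - 1 - j : Nat) : Int) - (k : Int))))
        (dp.reverse.headI - 1 - ((dp.length - 1 - j : Nat) : Int)) =
      (List.range (dp.length - j)).foldl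
        (fun a k => max a (pvF dp j (dp.length - 1 - k)))
        (dp.reverse.headI - 1 - ((dp.length - 1 - j : Nat) : Int)) := by
    refine PySem.List.foldl_congr_mem _ _ _ _ ?_
    intro acc k hk
    simp only [List.mem_range] at hk
    have hk1 : k < dp.reverse.length := by rw [List.length_reverse]; omega
    have hk2 : dp.length - 1 - k < dp.length := by omega
    have hrev : dp.reverse.getD k 0 = dp.getD (dp.length - 1 - k) 0 := by
      rw [List.getD_eq_getElem _ _ hk1, List.getD_eq_getElem _ _ hk2, List.getElem_reverse]
    have hF : pvF dp j (dp.length - 1 - k) =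
        dp.reverse.getD k 0 - (((dp.length - 1 - j : Nat) : Int) - (k : Int)) := by
      unfold pvF
      rw [hrev]
      have hcond : ¬ ((j : Int) > ((dp.length - 1 - k : Nat) : Int)) := by omega
      rw [if_neg hcond]
      congr 1
      omega
    rw [hF]
  rw [h1]
  have hhead : dp.reverse.headI = dp.getD (dp.length - 1) 0 := by
    rw [pv_headI_eq_getD dp.reverse hne,
      List.getD_eq_getElem _ _ (by rw [List.length_reverse]; omega),
      List.getD_eq_getElem _ _ (by omega : dp.length - 1 < dp.length),
      List.getElem_reverse]
    simp
  rw [← List.foldl_map (f := fun k => dp.length - 1 - k)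
    (g := fun a k => max a (pvF dp j k))]
  -- absorb the scan's initial accumulator into the k = n-1 term
  have habs : ((List.range (dp.length - j)).map (fun k => dp.length - 1 - k)).foldl
        (fun a k => max a (pvF dp j k))
        (dp.reverse.headI - 1 - ((dp.length - 1 - j : Nat) : Int)) =
      ((List.range (dp.length - j)).map (fun k => dp.length - 1 - k)).foldl
        (fun a k => max a (pvF dp j k)) (pvF dp j (dp.length - 1)) := by
    refine pv_absorb _ _ _ _ ?_ (dp.length - 1)
      (List.mem_map.mpr ⟨0, by simp; omega, by omega⟩) le_rfl
    unfold pvF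
    rw [hhead]
    have hcond : ¬ ((j : Int) > ((dp.length - 1 : Nat) : Int)) := by omega
    rw [if_neg hcond]
    omega
  rw [habs]
  -- the descending index list is a permutation of the ascending one
  have hperm : ((List.range (dp.length - j)).map (fun k => dp.length - 1 - k)).Perm
      ((List.range (dp.length - j)).map (fun k => j + k)) := by
    have hrev : ((List.range (dp.length - j)).map (fun k => j + k)).reverse =
        (List.range (dp.length - j)).map (fun k => dp.length - 1 - k) := by
      conv_lhs => rw [← List.map_reverse, List.range_eq_range', List.reverse_range',
        List.map_map]
      refine List.map_congr_left ?_
      intro k hk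
      simp only [List.mem_range] at hk
      simp only [Function.comp]
      omega
    rw [← hrev]
    exact List.reverse_perm _
  rw [pv_fold_max_perm _ _ _ _ hperm]
  -- swap the initial accumulator from the k = n-1 term to the k = j term
  exact pv_fold_init_swap _ (pvF dp j) (dp.length - 1) j
    (List.mem_map.mpr ⟨dp.length - j - 1, by simp; omega, by omega⟩)
    (List.mem_map.mpr ⟨0, by simp; omega, by omega⟩)

lemma pv_amax_split (dp : List Int) (j : Nat) (hj : j < dp.length) :
    pvAMax dp j =
      max ((List.range (j+1)).foldl (fun a k => max a (pvF dp j k)) (pvF dp j 0))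
        (((List.range (dp.length - j)).map (fun k => j + k)).foldl
          (fun a k => max a (pvF dp j k)) (pvF dp j j)) := by
  unfold pvAMax
  have hsplit : dp.length = (j + 1) + (dp.length - j - 1) := by omega
  -- split the full range at column j
  conv_lhs => rw [hsplit, List.range_add, List.foldl_append]
  -- rewrite the suffix-side fold into the same tail list
  have htail : (List.range (dp.length - j)).map (fun k => j + k) =
      j :: (List.range (dp.length - j - 1)).map (fun k => (j + 1) + k) := by
    have h1 : dp.length - j = (dp.length - j - 1) + 1 := by omega
    rw [h1, List.range_succ_eq_map, List.map_cons, List.map_map]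
    refine congrArg₂ _ (by omega) (List.map_congr_left ?_)
    intro k _
    simp only [Function.comp]
    omega
  rw [htail, List.foldl_cons, max_self]
  -- pull the left maximum out in front of the tail fold
  have hjle : pvF dp j j ≤
      (List.range (j+1)).foldl (fun a k => max a (pvF dp j k)) (pvF dp j 0) :=
    (PySem.List.le_foldl_max_int (List.range (j+1)) (pvF dp j) (pvF dp j 0)).2 j (by simp)
  rw [← pv_foldl_max_init, max_eq_left hjle]

-- the single-row step of A equals the single-row step of B
lemma pv_step_eq (row dp : List Int) (hn : 0 < dp.length) (hrow : dp.length ≤ row.length) :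
    (PySem.List.pyRange 0 (dp.length : Int) 1).map (fun j =>
        ((PySem.List.pyRange 0 (dp.length : Int) 1).foldl (fun acc k =>
          pvOMax acc (PySem.List.pyGetD dp k 0 + PySem.List.pyGetD row j 0
            - (if j > k then j - k else k - j))) none).getD 0) =
      List.zipWith (fun p l => p + l) row
        (List.zipWith max (pvLeftScan dp.headI dp)
          ((pvLeftScan dp.reverse.headI dp.reverse).reverse)) := by
  have hn1 : dp.length = (dp.length - 1) + 1 := by omega
  apply List.ext_getElem
  · simp [PySem.List.length_pyRange_one, pv_scan_length]
    omega
  intro i h1 h2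
  have hi : i < dp.length := by
    simpa [PySem.List.length_pyRange_one] using h1
  have hirow : i < row.length := lt_of_lt_of_le hi hrow
  rw [List.getElem_map, PySem.List.getElem_pyRange_one]
  simp only [zero_add]
  rw [PySem.List.pyRange_zero_nat, List.foldl_map]
  conv_lhs => rw [hn1, List.range_succ_eq_map, List.foldl_cons, List.foldl_map]
  rw [pv_omax_none, pv_omax_fold, Option.getD_some]
  have hcong : (List.range (dp.length - 1)).foldl
        (fun (a : Int) (k : Nat) => max a (PySem.List.pyGetD dp (((Nat.succ k : Nat)) : Int) 0
          + PySem.List.pyGetD row (i : Int) 0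
          - (if (i : Int) > ((Nat.succ k : Nat) : Int) then (i : Int) - ((Nat.succ k : Nat) : Int)
             else ((Nat.succ k : Nat) : Int) - (i : Int))))
        (PySem.List.pyGetD dp (((0 : Nat)) : Int) 0 + PySem.List.pyGetD row (i : Int) 0
          - (if (i : Int) > ((0 : Nat) : Int) then (i : Int) - ((0 : Nat) : Int)
             else ((0 : Nat) : Int) - (i : Int))) =
      (List.range (dp.length - 1)).foldl
        (fun (a : Int) (k : Nat) => max a (PySem.List.pyGetD row (i : Int) 0 + pvF dp i (k + 1)))
        (PySem.List.pyGetD row (i : Int) 0 + pvF dp i 0) := by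
    have hinit : PySem.List.pyGetD dp (((0 : Nat)) : Int) 0 + PySem.List.pyGetD row (i : Int) 0
          - (if (i : Int) > ((0 : Nat) : Int) then (i : Int) - ((0 : Nat) : Int)
             else ((0 : Nat) : Int) - (i : Int)) =
        PySem.List.pyGetD row (i : Int) 0 + pvF dp i 0 := by
      unfold pvF
      rw [PySem.List.pyGetD_natCast]
      ring
    rw [hinit]
    refine PySem.List.foldl_congr_mem _ _ _ _ ?_
    intro acc k _
    unfold pvF
    rw [PySem.List.pyGetD_natCast]
    simp only [Nat.succ_eq_add_one]
    ring_nf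
  rw [hcong, pv_max_add]
  have hAM : pvAMax dp i = (List.range (dp.length - 1)).foldl
      (fun a k => max a (pvF dp i (k + 1))) (pvF dp i 0) := by
    unfold pvAMax
    conv_lhs => rw [hn1, List.range_succ_eq_map, List.foldl_cons, List.foldl_map]
    rw [max_self]
  rw [← hAM, List.getElem_zipWith, List.getElem_zipWith,
    pv_left_entry dp i hi, pv_right_entry dp i hi, ← pv_amax_split dp i hi,
    PySem.List.pyGetD_natCast, List.getD_eq_getElem _ _ hirow]

lemma pv_foldl_inv {α σ : Type} (l : List α) (f g : σ → α → σ) (P : σ → Prop) :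
    ∀ init, P init → (∀ s a, a ∈ l → P s → f s a = g s a ∧ P (g s a)) →
      l.foldl f init = l.foldl g init := by
  induction l with
  | nil => intros; rfl
  | cons h t ih =>
    intro init hP hstep
    have := hstep init h (by simp) hP
    simp only [List.foldl_cons, this.1]
    exact ih (g init h) this.2 (fun s a ha hs => hstep s a (by simp [ha]) hs)

-- ===== VERDICT (by name: the statement is the Claim_ definition above) =====
theorem maxPoints_own_TLE_spec : Claim_equal_maxPoints_own_TLE := by
  intro points _hdom hpre
  unfold Spec_maxPoints_own_TLE maxPoints_own_TLE maxPoints_own_TLE_alt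
  by_cases hg : points = [] ∨ points.headI = []
  · rw [if_pos hg, if_pos hg]
  · rw [if_neg hg, if_neg hg]
    rw [not_or] at hg
    have hnpos : 0 < points.headI.length := List.length_pos_of_ne_nil hg.2
    dsimp only
    refine congrArg (fun l => (PySem.List.max? l (fun x => x)).getD 0) ?_
    rw [PySem.List.foldl_pyRange_pyGetD' points ([] : List Int)
      (fun dp row => (PySem.List.pyRange 0 ((points.headI.length : Nat) : Int) 1).map (fun j =>
        ((PySem.List.pyRange 0 ((points.headI.length : Nat) : Int) 1).foldl (fun acc k =>
          pvOMax acc (PySem.List.pyGetD dp k 0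
            + PySem.List.pyGetD row j 0
            - (if j > k then j - k else k - j))) none).getD 0))
      points.headI (by norm_num : (0 : Int) ≤ 1)]
    rw [show ((1 : Int)).toNat = 1 from rfl, List.drop_one]
    refine pv_foldl_inv points.tail _ _
      (fun dp => dp.length = points.headI.length) points.headI rfl ?_
    intro s row hrowmem hP
    have hrow : s.length ≤ row.length := by
      rw [hP]
      exact hpre row (List.mem_of_mem_tail hrowmem)
    have hn : 0 < s.length := by rw [hP]; exact hnpos
    constructor
    · have hstep := pv_step_eq row s hn hrow
      rw [hP] at hstep
      exact hstep
    · simp only [List.length_zipWith, List.length_reverse, pv_scan_length]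
      omega
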